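-- pv_equiv track=rewrite | github.com/Likhith-Asapu/Codemix-Pun-Generation | classification/Data/avg_funniness.py | get_max_label
-- ===== SOURCE A (Python) =====
-- def get_max_label(labels):
--     max_label = 0
--     max_count = 0
--     if len(labels) == 2:
--         return labels[0]
--     for label in labels:
--         count = labels.count(label)
--         if count > max_count:
--             max_count = count
--             max_label = label
--     return max_label
-- ===== SOURCE B (Python) =====
-- def get_max_label(labels):
--     if len(labels) == 2:
--         return labels[0]
--     max_label = 0
--     max_count = 0
--     rest = labels
--     while rest:
--         lab = rest[0]
--         others = [x for x in rest if x != lab]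
--         cnt = len(rest) - len(others)
--         if cnt > max_count:
--             max_label = lab
--             max_count = cnt
--         rest = others
--     return max_label
-- ===== Notes on version B (the rewrite author's own statement) =====
-- stated objective: faster
-- what changed: Replaces A's pass that recomputes labels.count(label) for every element by repeated head-extraction: each round one partition pass counts (via a length difference) and removes every occurrence of the first remaining label, so the list shrinks and each distinct label is counted exactly once.
import Mathlib
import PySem

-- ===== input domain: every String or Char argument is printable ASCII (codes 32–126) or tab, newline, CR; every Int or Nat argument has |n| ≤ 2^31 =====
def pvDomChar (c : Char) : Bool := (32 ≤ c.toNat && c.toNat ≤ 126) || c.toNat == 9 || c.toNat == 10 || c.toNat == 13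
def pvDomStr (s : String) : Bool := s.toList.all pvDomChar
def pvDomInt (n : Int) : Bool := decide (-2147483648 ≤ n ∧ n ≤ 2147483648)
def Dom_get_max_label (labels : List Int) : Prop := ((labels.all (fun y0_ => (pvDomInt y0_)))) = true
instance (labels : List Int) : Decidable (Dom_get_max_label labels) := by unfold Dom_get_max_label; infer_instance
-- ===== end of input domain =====

-- B replaces A's per-element labels.count rescan by repeated head-extraction: each round
-- counts and removes every occurrence of the first remaining label in one partition pass
-- over a shrinking list, so each distinct label is processed exactly once (alternative algorithm).

-- ===== PORT A =====
def get_max_label (labels : List Int) : Int :=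
  if labels.length = 2 then (PySem.List.pyGet? labels 0).getD 0  -- labels[0]; length = 2 so in range
  else
    (labels.foldl
      (fun s label =>
        if ((labels.count label : Int)) > s.2 then (label, (labels.count label : Int)) else s)
      ((0 : Int), (0 : Int))).1

-- ===== PORT B =====
-- the while loop of Source B: state (max_label, max_count), the list `rest` shrinks each round
def pvBestLoop : List Int → Int → Int → Int
  | [], maxLab, _ => maxLab
  | x :: xs, maxLab, maxCnt =>
    let others := (x :: xs).filter (fun y => y != x)
    let cnt : Int := ((x :: xs).length : Int) - (others.length : Int)
    if cnt > maxCnt then pvBestLoop others x cnt else pvBestLoop others maxLab maxCnt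
termination_by rest _ _ => rest.length
decreasing_by
  all_goals
    simp only [List.filter_cons, bne_self_eq_false, List.length_cons]
    exact Nat.lt_succ_of_le (List.length_filter_le _ _)

def get_max_label_alt (labels : List Int) : Int :=
  if labels.length = 2 then (PySem.List.pyGet? labels 0).getD 0  -- labels[0]; length = 2 so in range
  else pvBestLoop labels 0 0

-- ===== PRECONDITION & SPEC =====
def Spec_get_max_label (labels : List Int) (out : Int) : Prop := out = get_max_label_alt labels
instance (labels : List Int) (out : Int) : Decidable (Spec_get_max_label labels out) := by unfold Spec_get_max_label; infer_instance

-- ===== CLAIM (what is proved, stated in full; the proofs are below) =====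
def Claim_equal_get_max_label : Prop := ∀ (labels : List Int), Dom_get_max_label labels → Spec_get_max_label labels (get_max_label labels)

-- ===== LEMMAS AND PROOFS =====

-- the elements of xs not yet in `seen`, first occurrences in order
def pvFresh (seen : List Int) : List Int → List Int
  | [] => []
  | x :: xs => if x ∈ seen then pvFresh seen xs else x :: pvFresh (seen ++ [x]) xs

lemma pvFresh_ext (xs : List Int) : ∀ s t : List Int, (∀ a, a ∈ s ↔ a ∈ t) →
    pvFresh s xs = pvFresh t xs := by
  induction xs with
  | nil => intro s t _; simp [pvFresh]
  | cons x xs ih =>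
    intro s t h
    by_cases hx : x ∈ s
    · simp [pvFresh, hx, (h x).mp hx, ih s t h]
    · have hx' : x ∉ t := fun c => hx ((h x).mpr c)
      simp only [pvFresh, hx, hx', if_false]
      congr 1
      exact ih _ _ (by intro a; simp [h a])

lemma pvFresh_mem (xs : List Int) : ∀ {seen : List Int} {l : Int}, l ∈ pvFresh seen xs → l ∈ xs := by
  induction xs with
  | nil => intro seen l h; simp [pvFresh] at h
  | cons x xs ih =>
    intro seen l h
    by_cases hx : x ∈ seen
    · rw [show pvFresh seen (x :: xs) = pvFresh seen xs from by simp [pvFresh, hx]] at h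
      exact List.mem_cons_of_mem _ (ih h)
    · rw [show pvFresh seen (x :: xs) = x :: pvFresh (seen ++ [x]) xs from by
        simp [pvFresh, hx]] at h
      rcases List.mem_cons.mp h with rfl | h
      · simp
      · exact List.mem_cons_of_mem _ (ih h)

-- banning one more label from `seen` = filtering it out of the list being scanned
lemma pvFresh_cons_filter (xs : List Int) : ∀ (seen : List Int) (x : Int),
    pvFresh (x :: seen) xs = pvFresh seen (xs.filter (fun y => y != x)) := by
  induction xs with
  | nil => intro seen x; simp [pvFresh]
  | cons y ys ih =>
    intro seen x
    by_cases hyx : y = x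
    · subst hyx
      have h1 : pvFresh (y :: seen) (y :: ys) = pvFresh (y :: seen) ys := by
        simp [pvFresh]
      have h2 : (y :: ys).filter (fun z => z != y) = ys.filter (fun z => z != y) := by
        simp
      rw [h1, h2, ih]
    · have h2 : (y :: ys).filter (fun z => z != x) = y :: ys.filter (fun z => z != x) := by
        simp [hyx]
      by_cases hy : y ∈ seen
      · have hc : y ∈ x :: seen := List.mem_cons_of_mem _ hy
        have h1 : pvFresh (x :: seen) (y :: ys) = pvFresh (x :: seen) ys := by
          simp [pvFresh, hc]
        have h3 : pvFresh seen (y :: ys.filter (fun z => z != x))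
            = pvFresh seen (ys.filter (fun z => z != x)) := by
          simp [pvFresh, hy]
        rw [h1, h2, h3, ih]
      · have hc : y ∉ x :: seen := by simp [hyx, hy]
        have h1 : pvFresh (x :: seen) (y :: ys) = y :: pvFresh ((x :: seen) ++ [y]) ys := by
          simp [pvFresh, hc]
        have h3 : pvFresh seen (y :: ys.filter (fun z => z != x))
            = y :: pvFresh (seen ++ [y]) (ys.filter (fun z => z != x)) := by
          simp [pvFresh, hy]
        rw [h1, h2, h3]
        congr 1
        calc pvFresh ((x :: seen) ++ [y]) ys
            = pvFresh (x :: (seen ++ [y])) ys := pvFresh_ext ys _ _ (by intro a; simp)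
          _ = pvFresh (seen ++ [y]) (ys.filter (fun z => z != x)) := ih (seen ++ [y]) x

-- A's fold visits each label once per occurrence, but repeats never win: the fold
-- equals the same fold over the first occurrences only.
lemma pvFold_skip (c : Int → Int) (xs : List Int) : ∀ (seen : List Int) (s : Int × Int),
    (∀ l ∈ seen, c l ≤ s.2) →
    xs.foldl (fun s l => if c l > s.2 then (l, c l) else s) s
      = (pvFresh seen xs).foldl (fun s l => if c l > s.2 then (l, c l) else s) s := by
  induction xs with
  | nil => intro seen s _; simp [pvFresh]
  | cons x xs ih =>
    intro seen s H
    by_cases hx : x ∈ seen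
    · have hskip : (if c x > s.2 then (x, c x) else s) = s := by
        have := H x hx; simp [not_lt.mpr this]
      simp only [pvFresh, hx, if_pos, List.foldl_cons, hskip]
      exact ih seen s H
    · simp only [pvFresh, hx, List.foldl_cons, if_false]
      apply ih (seen ++ [x])
      intro l hl
      rcases List.mem_append.mp hl with h | h
      · have := H l h; split_ifs with hc
        · exact le_trans this (le_of_lt hc)
        · exact this
      · simp at h; subst h; split_ifs with hc
        · exact le_refl _
        · exact not_lt.mp hc

lemma pv_count_filter_ne (xs : List Int) (x l : Int) (h : l ≠ x) :
    (xs.filter (fun y => y != x)).count l = xs.count l := by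
  induction xs with
  | nil => simp
  | cons y ys ih =>
    by_cases hyx : y = x
    · subst hyx
      simp [Ne.symm h, ih]
    · simp [hyx, List.count_cons, ih]

lemma pv_count_add_filter (a : Int) (l : List Int) :
    l.count a + (l.filter (fun y => y != a)).length = l.length := by
  induction l with
  | nil => simp
  | cons y ys ih =>
    by_cases h : y = a
    · subst h
      simp only [List.count_cons, List.filter_cons, bne_self_eq_false, Bool.false_eq_true,
        if_false, List.length_cons, BEq.rfl, if_true]
      omega
    · simp only [List.count_cons, List.filter_cons, List.length_cons]
      rw [if_neg (by simp [h]), if_pos (by simp [h])]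
      simp only [List.length_cons]
      omega

-- one unfolding of the loop on a nonempty list
lemma pvBestLoop_cons (x : Int) (xs : List Int) (maxLab maxCnt : Int) :
    pvBestLoop (x :: xs) maxLab maxCnt
      = (if (((x :: xs).length : Int) - (((x :: xs).filter (fun y => y != x)).length : Int)) > maxCnt
         then pvBestLoop ((x :: xs).filter (fun y => y != x)) x
                (((x :: xs).length : Int) - (((x :: xs).filter (fun y => y != x)).length : Int))
         else pvBestLoop ((x :: xs).filter (fun y => y != x)) maxLab maxCnt) := by
  rw [pvBestLoop]

-- B's loop over `rest` equals A's strict-> fold over the distinct labels of `rest`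
-- (in first-appearance order), with counts taken in `rest`.
lemma pvBestLoop_eq (n : Nat) : ∀ (rest : List Int), rest.length ≤ n → ∀ (s : Int × Int),
    pvBestLoop rest s.1 s.2
      = ((pvFresh [] rest).foldl
          (fun st l => if ((rest.count l : Int)) > st.2 then (l, (rest.count l : Int)) else st)
          s).1 := by
  induction n with
  | zero =>
    intro rest h s
    have : rest = [] := List.eq_nil_of_length_eq_zero (Nat.le_zero.mp h)
    subst this; simp [pvBestLoop, pvFresh]
  | succ n ih =>
    intro rest hlen s
    match rest with
    | [] => simp [pvBestLoop, pvFresh]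
    | x :: xs =>
      have hfil : (x :: xs).filter (fun y => y != x) = xs.filter (fun y => y != x) := by
        simp
      have hlen' : (xs.filter (fun y => y != x)).length ≤ n := by
        have := List.length_filter_le (fun y => y != x) xs
        simp only [List.length_cons] at hlen
        omega
      have hcnt : (((x :: xs).length : Int) - ((xs.filter (fun y => y != x)).length : Int))
          = ((x :: xs).count x : Int) := by
        have := pv_count_add_filter x (x :: xs)
        rw [hfil] at this
        omega
      have hfresh : pvFresh ([] : List Int) (x :: xs)
          = x :: pvFresh [] (xs.filter (fun y => y != x)) := by
        rw [show pvFresh ([] : List Int) (x :: xs) = x :: pvFresh [x] xs from by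
          simp [pvFresh]]
        rw [pvFresh_cons_filter xs [] x]
      have hcong : ∀ t : Int × Int,
          ((pvFresh [] (xs.filter (fun y => y != x))).foldl
            (fun st l => if (((x :: xs).count l : Int)) > st.2
                         then (l, ((x :: xs).count l : Int)) else st) t)
          = ((pvFresh [] (xs.filter (fun y => y != x))).foldl
            (fun st l => if (((xs.filter (fun y => y != x)).count l : Int)) > st.2
                         then (l, ((xs.filter (fun y => y != x)).count l : Int)) else st) t) := by
        intro t
        apply PySem.List.foldl_congr_mem
        intro acc l hl
        have hlx : l ≠ x := by
          have hmem := pvFresh_mem _ hl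
          have := List.of_mem_filter hmem
          simpa using this
        have hc : (xs.filter (fun y => y != x)).count l = (x :: xs).count l := by
          rw [pv_count_filter_ne xs x l hlx, List.count_cons]
          simp [Ne.symm hlx]
        rw [hc]
      rw [pvBestLoop_cons, hfil, hcnt, hfresh]
      simp only [List.foldl_cons]
      rw [hcong]
      split_ifs with h
      · exact ih (xs.filter (fun y => y != x)) hlen' (x, ((x :: xs).count x : Int))
      · exact ih (xs.filter (fun y => y != x)) hlen' s

-- ===== VERDICT (by name: the statement is the Claim_ definition above) =====
theorem get_max_label_spec : Claim_equal_get_max_label := by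
  intro labels _
  show get_max_label labels = get_max_label_alt labels
  unfold get_max_label get_max_label_alt
  by_cases h2 : labels.length = 2
  · simp [h2]
  · simp only [h2, if_false]
    have hskip := pvFold_skip (fun l => (labels.count l : Int)) labels [] ((0 : Int), (0 : Int))
      (by simp)
    simp only at hskip
    rw [pvBestLoop_eq labels.length labels le_rfl ((0 : Int), (0 : Int)), ← hskip]
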